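-- pv_equiv track=rewrite | github.com/LanaAndrade/gsdatags | src/_2_eng_at.py | map_devtype_to_track
-- ===== SOURCE A (Python) =====
-- from typing import List, Dict, Optional
--
-- DEVTYPE_TO_TRACK: Dict[str, str] = {
--     "Back-end developer": "backend",
--     "Front-end developer": "frontend",
--     "Full-stack developer": "backend",
--     "Mobile developer": "mobile",
--     "Data scientist or machine learning specialist": "data_ml",
--     "Data or business analyst": "data_ml",
--     "DevOps specialist": "devops_sre",
--     "Site reliability engineer": "devops_sre",
--     "Database administrator": "data_ml",
--     "Cloud infrastructure engineer": "devops_sre",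
--     "QA or test developer": "qa",
--     "Product designer or UX designer": "ux",
--     "Game or graphics developer": "frontend",
-- }
--
-- TRACK_PRIORITY = ["devops_sre", "data_ml", "backend", "frontend", "mobile", "qa", "ux"]
--
-- def map_devtype_to_track(devtype: str) -> Optional[str]:
--     """Mapeia um texto de DevType para uma trilha de carreira."""
--     if not isinstance(devtype, str) or not devtype.strip():
--         return None
--
--     roles = [t.strip() for t in devtype.split(";") if t.strip()]
--     tracks: List[str] = []
--
--     for role in roles:
--         track = DEVTYPE_TO_TRACK.get(role)
--         if track:
--             tracks.append(track)
--
--     if not tracks: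
--         return None
--
--     for t in TRACK_PRIORITY:
--         if t in tracks:
--             return t
--
--     return tracks[0]
-- ===== SOURCE B (Python) =====
-- from typing import Dict, Optional
--
-- DEVTYPE_TO_TRACK: Dict[str, str] = {
--     "Back-end developer": "backend",
--     "Front-end developer": "frontend",
--     "Full-stack developer": "backend",
--     "Mobile developer": "mobile",
--     "Data scientist or machine learning specialist": "data_ml",
--     "Data or business analyst": "data_ml",
--     "DevOps specialist": "devops_sre",
--     "Site reliability engineer": "devops_sre",
--     "Database administrator": "data_ml",
--     "Cloud infrastructure engineer": "devops_sre",
--     "QA or test developer": "qa",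
--     "Game or graphics developer": "frontend",
--     "Product designer or UX designer": "ux",
-- }
--
-- TRACK_PRIORITY = ["devops_sre", "data_ml", "backend", "frontend", "mobile", "qa", "ux"]
-- PRIORITY_INDEX = {t: i for i, t in enumerate(TRACK_PRIORITY)}
--
-- def map_devtype_to_track(devtype: str) -> Optional[str]:
--     """Mapeia um texto de DevType para uma trilha de carreira."""
--     if not isinstance(devtype, str) or not devtype.strip():
--         return None
--     best = None
--     for part in devtype.split(";"):
--         i = PRIORITY_INDEX.get(DEVTYPE_TO_TRACK.get(part.strip(), ""))
--         if i is not None and (best is None or i < best):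
--             best = i
--     return None if best is None else TRACK_PRIORITY[best]
-- ===== Notes on version B (the rewrite author's own statement) =====
-- stated objective: alternative
-- what changed: B replaces A's build-a-tracks-list-then-scan-TRACK_PRIORITY with a single pass over the roles that keeps only the minimum priority index (via a precomputed track->index dict) and indexes TRACK_PRIORITY once at the end.
import Mathlib
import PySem

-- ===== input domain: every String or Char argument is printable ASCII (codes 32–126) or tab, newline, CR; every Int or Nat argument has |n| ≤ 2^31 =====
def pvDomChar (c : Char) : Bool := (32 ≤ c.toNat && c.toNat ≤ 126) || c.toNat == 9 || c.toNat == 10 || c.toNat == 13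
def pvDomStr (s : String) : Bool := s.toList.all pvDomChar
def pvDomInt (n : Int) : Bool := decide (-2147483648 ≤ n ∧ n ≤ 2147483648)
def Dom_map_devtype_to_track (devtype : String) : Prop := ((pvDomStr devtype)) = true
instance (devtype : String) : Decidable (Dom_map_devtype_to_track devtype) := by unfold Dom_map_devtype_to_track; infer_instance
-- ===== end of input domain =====

-- B replaces A's build-a-tracks-list-then-scan-TRACK_PRIORITY with a single min-priority-index pass over the roles.

-- ===== PORT A =====
def DEVTYPE_TO_TRACK : PySem.Dict String String := PySem.Dict.ofList [
  ("Back-end developer", "backend"),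
  ("Front-end developer", "frontend"),
  ("Full-stack developer", "backend"),
  ("Mobile developer", "mobile"),
  ("Data scientist or machine learning specialist", "data_ml"),
  ("Data or business analyst", "data_ml"),
  ("DevOps specialist", "devops_sre"),
  ("Site reliability engineer", "devops_sre"),
  ("Database administrator", "data_ml"),
  ("Cloud infrastructure engineer", "devops_sre"),
  ("QA or test developer", "qa"),
  ("Product designer or UX designer", "ux"),
  ("Game or graphics developer", "frontend")]

def TRACK_PRIORITY : List String := ["devops_sre", "data_ml", "backend", "frontend", "mobile", "qa", "ux"]

-- devtype.split(";"): the separator is the literal ";" (never ""), so split? is always `some`; getD's [] is unreachable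
def map_devtype_to_track (devtype : String) : Option String :=
  if PySem.Str.strip devtype = "" then none
  else
    let roles := (((PySem.Str.split? devtype ";").getD []).map PySem.Str.strip).filter (fun r => r ≠ "")
    let tracks := roles.foldl (fun acc role =>
      match DEVTYPE_TO_TRACK.get? role with
      | some t => if t ≠ "" then acc ++ [t] else acc
      | none => acc) []
    if tracks = [] then none
    else
      match TRACK_PRIORITY.find? (fun t => tracks.contains t) with
      | some t => some t
      | none => PySem.List.pyGet? tracks 0

-- ===== PORT B =====
-- PRIORITY_INDEX = {t: i for i, t in enumerate(TRACK_PRIORITY)}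
def PRIORITY_INDEX : PySem.Dict String Int :=
  PySem.Dict.ofList ((PySem.List.enumerate TRACK_PRIORITY).map (fun p => (p.2, p.1)))

-- one loop iteration: i = PRIORITY_INDEX.get(DEVTYPE_TO_TRACK.get(part.strip(), "")); keep the smaller index
def bstep (best : Option Int) (part : String) : Option Int :=
  match DEVTYPE_TO_TRACK.getD (PySem.Str.strip part) "" |> PRIORITY_INDEX.get? with
  | none => best
  | some i =>
    match best with
    | none => some i
    | some b => if i < b then some i else some b

def map_devtype_to_track_alt (devtype : String) : Option String :=
  if PySem.Str.strip devtype = "" then none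
  else
    match ((PySem.Str.split? devtype ";").getD []).foldl bstep none with
    | none => none
    | some i => PySem.List.pyGet? TRACK_PRIORITY i

-- ===== PRECONDITION & SPEC =====
def Spec_map_devtype_to_track (devtype : String) (out : Option String) : Prop := out = map_devtype_to_track_alt devtype
instance (devtype : String) (out : Option String) : Decidable (Spec_map_devtype_to_track devtype out) := by unfold Spec_map_devtype_to_track; infer_instance

-- ===== CLAIM (what is proved, stated in full; the proofs are below) =====
def Claim_equal_map_devtype_to_track : Prop := ∀ (devtype : String), Dom_map_devtype_to_track devtype → Spec_map_devtype_to_track devtype (map_devtype_to_track devtype)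

-- ===== LEMMAS AND PROOFS =====

-- A's loop body, named; and B's loop body on an already-looked-up track
def astep (acc : List String) (role : String) : List String :=
  match DEVTYPE_TO_TRACK.get? role with
  | some t => if t ≠ "" then acc ++ [t] else acc
  | none => acc

def mstep (best : Option Int) (t : String) : Option Int :=
  match PRIORITY_INDEX.get? t with
  | none => best
  | some i =>
    match best with
    | none => some i
    | some b => if i < b then some i else some b

-- every value of DEVTYPE_TO_TRACK is a priority track
theorem DT_val {r t : String} (h : DEVTYPE_TO_TRACK.get? r = some t) : t ∈ TRACK_PRIORITY := by
  have h2 : (r, t) ∈ DEVTYPE_TO_TRACK.items := PySem.Dict.mem_items_of_get?_eq_some _ h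
  have h3 : t ∈ DEVTYPE_TO_TRACK.values := List.mem_map.mpr ⟨(r, t), h2, rfl⟩
  have dv : ∀ x ∈ DEVTYPE_TO_TRACK.values, x ∈ TRACK_PRIORITY := by decide
  exact dv t h3

theorem tracks_eq (roles : List String) (acc : List String) :
    roles.foldl astep acc = acc ++ roles.filterMap DEVTYPE_TO_TRACK.get? := by
  induction roles generalizing acc with
  | nil => simp
  | cons r rs ih =>
    simp only [List.foldl_cons, List.filterMap_cons]
    cases h : DEVTYPE_TO_TRACK.get? r with
    | none => simp [astep, h, ih]
    | some t =>
      have ht : t ≠ "" := by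
        have hm := DT_val h
        simp [TRACK_PRIORITY] at hm
        rcases hm with rfl|rfl|rfl|rfl|rfl|rfl|rfl <;> decide
      simp [astep, h, ht, ih]

theorem bstep_eq (b : Option Int) (p : String) :
    bstep b p = match DEVTYPE_TO_TRACK.get? (PySem.Str.strip p) with
                | none => b
                | some t => mstep b t := by
  unfold bstep mstep
  rw [PySem.Dict.getD_eq_get?_getD]
  cases h : DEVTYPE_TO_TRACK.get? (PySem.Str.strip p) with
  | none =>
    have h0 : PRIORITY_INDEX.get? "" = none := by decide
    simp [h0]
  | some t => simp

theorem bfold_eq (parts : List String) (b : Option Int) :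
    parts.foldl bstep b
      = (parts.filterMap (fun p => DEVTYPE_TO_TRACK.get? (PySem.Str.strip p))).foldl mstep b := by
  induction parts generalizing b with
  | nil => rfl
  | cons p ps ih =>
    simp only [List.foldl_cons, List.filterMap_cons, bstep_eq]
    cases h : DEVTYPE_TO_TRACK.get? (PySem.Str.strip p) <;> simp [h, ih]

theorem filter_blank_drop (l : List String) :
    (l.filter (fun r => r ≠ "")).filterMap DEVTYPE_TO_TRACK.get?
      = l.filterMap DEVTYPE_TO_TRACK.get? := by
  have hg : DEVTYPE_TO_TRACK.get? "" = none := by decide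
  induction l with
  | nil => rfl
  | cons x xs ih =>
    by_cases hx : x = ""
    · subst hx
      rw [List.filter_cons, if_neg (by decide), ih, List.filterMap_cons, hg]
    · rw [List.filter_cons, if_pos (by simpa using hx), List.filterMap_cons, List.filterMap_cons, ih]

-- `mstep` keeps the accumulator `some`
theorem mfold_ne_none (ts : List String) (b : Int) :
    ts.foldl mstep (some b) ≠ none := by
  induction ts generalizing b with
  | nil => simp
  | cons t ts ih =>
    simp only [List.foldl_cons, mstep]
    cases h : PRIORITY_INDEX.get? t with
    | none => exact ih b
    | some i =>
      by_cases hib : i < b <;> simp [hib] <;> exact ih _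

theorem mfold_none (ts : List String) (hts : ∀ t ∈ ts, t ∈ TRACK_PRIORITY)
    (h : ts.foldl mstep none = none) : ts = [] := by
  cases ts with
  | nil => rfl
  | cons t ts =>
    exfalso
    have hd : ∀ t ∈ TRACK_PRIORITY, (PRIORITY_INDEX.get? t).isSome := by decide
    obtain ⟨k, hk⟩ := Option.isSome_iff_exists.mp (hd t (hts t (by simp)))
    simp only [List.foldl_cons, mstep, hk] at h
    exact mfold_ne_none ts k h

theorem mfold_spec (ts : List String) (b : Option Int) (i : Int)
    (h : ts.foldl mstep b = some i) :
    (b = some i ∨ ∃ t ∈ ts, PRIORITY_INDEX.get? t = some i) ∧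
    (∀ j, b = some j → i ≤ j) ∧
    (∀ t ∈ ts, ∀ j, PRIORITY_INDEX.get? t = some j → i ≤ j) := by
  induction ts generalizing b with
  | nil => simp_all
  | cons t ts ih =>
    simp only [List.foldl_cons] at h
    obtain ⟨h1, h2, h3⟩ := ih (mstep b t) h
    cases hidx : PRIORITY_INDEX.get? t with
    | none =>
      have hmb : mstep b t = b := by simp [mstep, hidx]
      rw [hmb] at h1 h2
      refine ⟨?_, h2, ?_⟩
      · rcases h1 with h1|⟨u, hu, hui⟩
        · exact Or.inl h1
        · exact Or.inr ⟨u, by simp [hu], hui⟩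
      · intro u hu j hj
        rcases List.mem_cons.mp hu with rfl|hu
        · rw [hidx] at hj; cases hj
        · exact h3 u hu j hj
    | some k =>
      have hle_k : i ≤ k := by
        cases b with
        | none =>
          have hm : mstep none t = some k := by simp [mstep, hidx]
          rw [hm] at h2; exact h2 k rfl
        | some b0 =>
          have hm : mstep (some b0) t = some (if k < b0 then k else b0) := by
            simp only [mstep, hidx]; split_ifs <;> simp_all
          rw [hm] at h2
          have := h2 (if k < b0 then k else b0) rfl
          split_ifs at this <;> omega
      refine ⟨?_, ?_, ?_⟩
      · cases b with
        | none =>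
          rcases h1 with h1|⟨u, hu, hui⟩
          · simp only [mstep, hidx] at h1
            exact Or.inr ⟨t, by simp, by rw [hidx, Option.some_inj.mp h1]⟩
          · exact Or.inr ⟨u, by simp [hu], hui⟩
        | some b0 =>
          rcases h1 with h1|⟨u, hu, hui⟩
          · simp only [mstep, hidx] at h1
            split_ifs at h1 with hkb
            · exact Or.inr ⟨t, by simp, by rw [hidx, Option.some_inj.mp h1]⟩
            · exact Or.inl h1
          · exact Or.inr ⟨u, by simp [hu], hui⟩
      · intro j hj
        cases b with
        | none => cases hj
        | some b0 =>
          cases hj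
          have hm : mstep (some j) t = some (if k < j then k else j) := by
            simp only [mstep, hidx]; split_ifs <;> simp_all
          rw [hm] at h2
          have := h2 (if k < j then k else j) rfl
          split_ifs at this <;> omega
      · intro u hu j hj
        rcases List.mem_cons.mp hu with rfl|hu
        · rw [hidx] at hj
          cases hj
          exact hle_k
        · exact h3 u hu j hj

theorem notmem_of_min {ts : List String} {i : Int}
    (hmin : ∀ t ∈ ts, ∀ j, PRIORITY_INDEX.get? t = some j → i ≤ j)
    (s : String) (j : Int) (hidx : PRIORITY_INDEX.get? s = some j) (hji : j < i) :
    s ∉ ts := fun hm => absurd (hmin s hm j hidx) (by omega)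

theorem select_eq (ts : List String) (hts : ∀ t ∈ ts, t ∈ TRACK_PRIORITY) :
    (if ts = [] then none
     else
       match TRACK_PRIORITY.find? (fun t => ts.contains t) with
       | some t => some t
       | none => PySem.List.pyGet? ts 0)
    = (match ts.foldl mstep none with
       | none => none
       | some i => PySem.List.pyGet? TRACK_PRIORITY i) := by
  cases hm : ts.foldl mstep none with
  | none => simp [mfold_none ts hts hm]
  | some i =>
    obtain ⟨h1, _, h3⟩ := mfold_spec ts none i hm
    rcases h1 with h1|⟨t, hmem, hidx⟩
    · cases h1
    have hne : ts ≠ [] := List.ne_nil_of_mem hmem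
    have htP : t ∈ TRACK_PRIORITY := hts t hmem
    simp only [TRACK_PRIORITY, List.mem_cons, List.not_mem_nil, or_false] at htP
    rcases htP with rfl|rfl|rfl|rfl|rfl|rfl|rfl
    · have hi : i = 0 := by
        rw [show PRIORITY_INDEX.get? "devops_sre" = some 0 from by decide] at hidx
        exact (Option.some_inj.mp hidx).symm
      subst hi
      simp [hne, TRACK_PRIORITY, List.find?, hmem]
    · have hi : i = 1 := by
        rw [show PRIORITY_INDEX.get? "data_ml" = some 1 from by decide] at hidx
        exact (Option.some_inj.mp hidx).symm
      subst hi
      have n0 : "devops_sre" ∉ ts := notmem_of_min h3 "devops_sre" 0 (by decide) (by omega)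
      simp [hne, TRACK_PRIORITY, List.find?, n0, hmem]
    · have hi : i = 2 := by
        rw [show PRIORITY_INDEX.get? "backend" = some 2 from by decide] at hidx
        exact (Option.some_inj.mp hidx).symm
      subst hi
      have n0 : "devops_sre" ∉ ts := notmem_of_min h3 "devops_sre" 0 (by decide) (by omega)
      have n1 : "data_ml" ∉ ts := notmem_of_min h3 "data_ml" 1 (by decide) (by omega)
      simp [hne, TRACK_PRIORITY, List.find?, n0, n1, hmem]
    · have hi : i = 3 := by
        rw [show PRIORITY_INDEX.get? "frontend" = some 3 from by decide] at hidx
        exact (Option.some_inj.mp hidx).symm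
      subst hi
      have n0 : "devops_sre" ∉ ts := notmem_of_min h3 "devops_sre" 0 (by decide) (by omega)
      have n1 : "data_ml" ∉ ts := notmem_of_min h3 "data_ml" 1 (by decide) (by omega)
      have n2 : "backend" ∉ ts := notmem_of_min h3 "backend" 2 (by decide) (by omega)
      simp [hne, TRACK_PRIORITY, List.find?, n0, n1, n2, hmem]
    · have hi : i = 4 := by
        rw [show PRIORITY_INDEX.get? "mobile" = some 4 from by decide] at hidx
        exact (Option.some_inj.mp hidx).symm
      subst hi
      have n0 : "devops_sre" ∉ ts := notmem_of_min h3 "devops_sre" 0 (by decide) (by omega)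
      have n1 : "data_ml" ∉ ts := notmem_of_min h3 "data_ml" 1 (by decide) (by omega)
      have n2 : "backend" ∉ ts := notmem_of_min h3 "backend" 2 (by decide) (by omega)
      have n3 : "frontend" ∉ ts := notmem_of_min h3 "frontend" 3 (by decide) (by omega)
      simp [hne, TRACK_PRIORITY, List.find?, n0, n1, n2, n3, hmem]
    · have hi : i = 5 := by
        rw [show PRIORITY_INDEX.get? "qa" = some 5 from by decide] at hidx
        exact (Option.some_inj.mp hidx).symm
      subst hi
      have n0 : "devops_sre" ∉ ts := notmem_of_min h3 "devops_sre" 0 (by decide) (by omega)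
      have n1 : "data_ml" ∉ ts := notmem_of_min h3 "data_ml" 1 (by decide) (by omega)
      have n2 : "backend" ∉ ts := notmem_of_min h3 "backend" 2 (by decide) (by omega)
      have n3 : "frontend" ∉ ts := notmem_of_min h3 "frontend" 3 (by decide) (by omega)
      have n4 : "mobile" ∉ ts := notmem_of_min h3 "mobile" 4 (by decide) (by omega)
      simp [hne, TRACK_PRIORITY, List.find?, n0, n1, n2, n3, n4, hmem]
    · have hi : i = 6 := by
        rw [show PRIORITY_INDEX.get? "ux" = some 6 from by decide] at hidx
        exact (Option.some_inj.mp hidx).symm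
      subst hi
      have n0 : "devops_sre" ∉ ts := notmem_of_min h3 "devops_sre" 0 (by decide) (by omega)
      have n1 : "data_ml" ∉ ts := notmem_of_min h3 "data_ml" 1 (by decide) (by omega)
      have n2 : "backend" ∉ ts := notmem_of_min h3 "backend" 2 (by decide) (by omega)
      have n3 : "frontend" ∉ ts := notmem_of_min h3 "frontend" 3 (by decide) (by omega)
      have n4 : "mobile" ∉ ts := notmem_of_min h3 "mobile" 4 (by decide) (by omega)
      have n5 : "qa" ∉ ts := notmem_of_min h3 "qa" 5 (by decide) (by omega)
      simp [hne, TRACK_PRIORITY, List.find?, n0, n1, n2, n3, n4, n5, hmem]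

-- ===== VERDICT (by name: the statement is the Claim_ definition above) =====
theorem map_devtype_to_track_spec : Claim_equal_map_devtype_to_track := by
  intro devtype _
  unfold Spec_map_devtype_to_track map_devtype_to_track map_devtype_to_track_alt
  by_cases h : PySem.Str.strip devtype = ""
  · simp [h]
  · simp only [h, if_false]
    have hA' : ((((PySem.Str.split? devtype ";").getD []).map PySem.Str.strip).filter (fun r => r ≠ "")).foldl
        (fun acc role =>
          match DEVTYPE_TO_TRACK.get? role with
          | some t => if t ≠ "" then acc ++ [t] else acc
          | none => acc) ([] : List String)
        = ((PySem.Str.split? devtype ";").getD []).filterMap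
            (fun p => DEVTYPE_TO_TRACK.get? (PySem.Str.strip p)) := by
      show List.foldl astep _ _ = _
      rw [tracks_eq, filter_blank_drop, List.filterMap_map]
      rfl
    show (if ((((PySem.Str.split? devtype ";").getD []).map PySem.Str.strip).filter (fun r => r ≠ "")).foldl
        (fun acc role =>
          match DEVTYPE_TO_TRACK.get? role with
          | some t => if t ≠ "" then acc ++ [t] else acc
          | none => acc) ([] : List String) = [] then none
      else
        match TRACK_PRIORITY.find? (fun t =>
          (((((PySem.Str.split? devtype ";").getD []).map PySem.Str.strip).filter (fun r => r ≠ "")).foldl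
            (fun acc role =>
              match DEVTYPE_TO_TRACK.get? role with
              | some t => if t ≠ "" then acc ++ [t] else acc
              | none => acc) ([] : List String)).contains t) with
        | some t => some t
        | none => PySem.List.pyGet? (((((PySem.Str.split? devtype ";").getD []).map PySem.Str.strip).filter (fun r => r ≠ "")).foldl
            (fun acc role =>
              match DEVTYPE_TO_TRACK.get? role with
              | some t => if t ≠ "" then acc ++ [t] else acc
              | none => acc) ([] : List String)) 0)
      = _
    rw [hA', bfold_eq]
    exact select_eq _ (fun t ht => DT_val (List.mem_filterMap.mp ht).choose_spec.2)
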